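-- pv_equiv track=rewrite | github.com/57n/SGP | SGP_gen.py | ntag2pat
-- ===== SOURCE A (Python) =====
-- from collections import Counter, defaultdict
-- from itertools import groupby
--
-- def ntag2pat(ntag, en_pat):
--     ntag = [tag for tag in ntag if tag != '_']
--     pat = [(tag, len(list(tags))) for tag, tags in groupby(ntag)]
--     tag_count = defaultdict(int)
--
--     if en_pat.split()[-1] in {'who', 'when', 'what', 'where', 'why', 'how', 'whether'}:
--         return [item[0] for item in pat]
--     else:
--         for tag, count in pat:
--             tag_count[tag] = max(tag_count[tag], count)
--         res = []
--         for tag, count in reversed(pat): #if multiple tag are in the same count, assign tag to the latter location because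
--             if count >= tag_count[tag] and tag not in res: #the tags are not usually appearing in the first location in chinese
--                 res.insert(0, tag)
--     return res
-- ===== SOURCE B (Python) =====
-- from itertools import groupby
--
-- WH = {'who', 'when', 'what', 'where', 'why', 'how', 'whether'}
--
-- def ntag2pat(ntag, en_pat):
--     runs = [(tag, len(list(g))) for tag, g in groupby(t for t in ntag if t != '_')]
--     if en_pat.split()[-1] in WH:
--         return [tag for tag, _ in runs]
--     maxc = {}
--     for tag, count in runs:
--         if count > maxc.get(tag, 0):
--             maxc[tag] = count
--     pos = {}
--     for i, (tag, count) in enumerate(runs):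
--         if count == maxc[tag]:
--             pos[tag] = i
--     return sorted(pos, key=pos.get)
-- ===== Notes on version B (the rewrite author's own statement) =====
-- stated objective: faster
-- what changed: The reversed iteration with res.insert(0,...) and a linear 'tag not in res' scan (quadratic in the number of runs) is replaced by a forward pass recording pos[tag] = index of the last max-count run in a dict, followed by sorting the distinct tags by that index.
import Mathlib
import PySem

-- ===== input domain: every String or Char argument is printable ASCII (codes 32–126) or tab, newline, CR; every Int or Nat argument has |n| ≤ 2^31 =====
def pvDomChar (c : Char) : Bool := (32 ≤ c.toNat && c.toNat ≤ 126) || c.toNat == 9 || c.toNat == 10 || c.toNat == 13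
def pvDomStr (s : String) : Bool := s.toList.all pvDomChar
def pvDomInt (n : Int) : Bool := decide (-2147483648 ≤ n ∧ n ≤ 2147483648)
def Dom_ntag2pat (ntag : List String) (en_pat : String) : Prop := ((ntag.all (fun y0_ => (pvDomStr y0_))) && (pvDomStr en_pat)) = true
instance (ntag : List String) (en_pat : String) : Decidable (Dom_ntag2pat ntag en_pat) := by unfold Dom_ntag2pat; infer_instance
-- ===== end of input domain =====

-- B replaces A's reversed insert(0)/membership-scan loop (quadratic in the number of runs) by one
-- forward pass recording the last max-count run index per tag in a dict, then sorting the distinct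
-- tags by that index (measured faster in a timing run).

-- ===== PORT A =====
-- itertools.groupby(l) consumed as [(tag, len(list(g)))]: run-length encoding (shared by both ports)
def pyRunsAux (t : String) (c : Int) : List String → List (String × Int)
  | [] => [(t, c)]
  | y :: ys => if y = t then pyRunsAux t (c + 1) ys else (t, c) :: pyRunsAux y 1 ys

def pyRuns : List String → List (String × Int)
  | [] => []
  | x :: xs => pyRunsAux x 1 xs

def whList : List String := ["who", "when", "what", "where", "why", "how", "whether"]

def ntag2pat (ntag : List String) (en_pat : String) : List String :=
  let ntag2 := ntag.filter (fun tag => decide (tag ≠ "_"))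
  let pat := pyRuns ntag2
  match PySem.List.pyGet? (PySem.Str.split₀ en_pat) (-1) with
  | none => []  -- unreachable under Pre_: Python raises IndexError here
  | some w =>
    if whList.contains w then
      pat.map (fun item => item.1)
    else
      let tag_count := pat.foldl (fun d p => d.insert p.1 (max (d.getD p.1 0) p.2)) PySem.Dict.empty
      pat.reverse.foldl
        (fun res p => if tag_count.getD p.1 0 ≤ p.2 ∧ p.1 ∉ res then PySem.List.insert res 0 p.1 else res) []

-- ===== PORT B =====
def ntag2pat_alt (ntag : List String) (en_pat : String) : List String :=
  let runs := pyRuns (ntag.filter (fun tag => decide (tag ≠ "_")))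
  match PySem.List.pyGet? (PySem.Str.split₀ en_pat) (-1) with
  | none => []  -- unreachable under Pre_: Python raises IndexError here
  | some w =>
    if whList.contains w then
      runs.map Prod.fst
    else
      let maxc := runs.foldl (fun d p => if d.getD p.1 0 < p.2 then d.insert p.1 p.2 else d) PySem.Dict.empty
      let pos := (PySem.List.enumerate runs 0).foldl
        (fun d q => if q.2.2 = maxc.getD q.2.1 0 then d.insert q.2.1 q.1 else d) PySem.Dict.empty
      PySem.List.sorted pos.keys (fun t => pos.getD t 0) false

-- ===== PRECONDITION & SPEC =====
-- Pre_ excludes exactly the inputs whose en_pat has no words: there Python A (and B too) raises IndexError.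
def Pre_ntag2pat (ntag : List String) (en_pat : String) : Prop := PySem.Str.split₀ en_pat ≠ []
instance (ntag : List String) (en_pat : String) : Decidable (Pre_ntag2pat ntag en_pat) := by unfold Pre_ntag2pat; infer_instance

def pvWitness_ntag2pat : List String × String := (["N", "N", "V"], "do it")

def Spec_ntag2pat (ntag : List String) (en_pat : String) (out : List String) : Prop := out = ntag2pat_alt ntag en_pat
instance (ntag : List String) (en_pat : String) (out : List String) : Decidable (Spec_ntag2pat ntag en_pat out) := by unfold Spec_ntag2pat; infer_instance

-- ===== CLAIM (what is proved, stated in full; the proofs are below) =====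
def Claim_equal_ntag2pat : Prop := ∀ (ntag : List String) (en_pat : String), Dom_ntag2pat ntag en_pat → Pre_ntag2pat ntag en_pat → Spec_ntag2pat ntag en_pat (ntag2pat ntag en_pat)

-- ===== LEMMAS AND PROOFS =====

-- max run count per tag (0 when absent)
def Mx : List (String × Int) → String → Int
  | [], _ => 0
  | p :: l, t => if p.1 = t then max p.2 (Mx l t) else Mx l t

theorem Mx_cons (p : String × Int) (l : List (String × Int)) (t : String) :
    Mx (p :: l) t = if p.1 = t then max p.2 (Mx l t) else Mx l t := rfl

theorem Mx_nonneg (l : List (String × Int)) (t : String) : 0 ≤ Mx l t := by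
  induction l with
  | nil => simp [Mx]
  | cons p l ih => rw [Mx_cons]; split <;> omega

theorem le_Mx_of_mem {l : List (String × Int)} {p : String × Int} (h : p ∈ l) : p.2 ≤ Mx l p.1 := by
  induction l with
  | nil => cases h
  | cons q l ih =>
    rcases List.mem_cons.mp h with rfl | h'
    · rw [Mx_cons, if_pos rfl]; omega
    · have := ih h'
      rw [Mx_cons]; split <;> omega

theorem getD_maxfoldA (l : List (String × Int)) :
    ∀ (d : PySem.Dict String Int) (t : String), (∀ s, 0 ≤ d.getD s 0) →
      (l.foldl (fun d p => d.insert p.1 (max (d.getD p.1 0) p.2)) d).getD t 0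
        = max (d.getD t 0) (Mx l t) := by
  induction l with
  | nil => intro d t hd; simp only [List.foldl_nil, Mx]; have := hd t; omega
  | cons p l ih =>
    intro d t hd
    rw [List.foldl_cons, ih _ t (fun s => by
      rw [PySem.Dict.getD_insert]
      split
      · have := hd p.1; omega
      · exact hd s), PySem.Dict.getD_insert, Mx_cons]
    by_cases h : t = p.1
    · subst h; rw [if_pos rfl, if_pos rfl]; omega
    · rw [if_neg h, if_neg (fun e => h e.symm)]

theorem getD_maxfoldB (l : List (String × Int)) :
    ∀ (d : PySem.Dict String Int) (t : String), (∀ s, 0 ≤ d.getD s 0) →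
      (l.foldl (fun d p => if d.getD p.1 0 < p.2 then d.insert p.1 p.2 else d) d).getD t 0
        = max (d.getD t 0) (Mx l t) := by
  induction l with
  | nil => intro d t hd; simp only [List.foldl_nil, Mx]; have := hd t; omega
  | cons p l ih =>
    intro d t hd
    rw [List.foldl_cons]
    by_cases hc : d.getD p.1 0 < p.2
    · rw [if_pos hc, ih _ t (fun s => by
        rw [PySem.Dict.getD_insert]
        split
        · have := hd p.1; omega
        · exact hd s), PySem.Dict.getD_insert, Mx_cons]
      by_cases h : t = p.1
      · subst h; rw [if_pos rfl, if_pos rfl]; omega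
      · rw [if_neg h, if_neg (fun e => h e.symm)]
    · rw [if_neg hc, ih _ t hd, Mx_cons]
      by_cases h : t = p.1
      · subst h; rw [if_pos rfl]; omega
      · rw [if_neg (fun e => h e.symm : ¬ p.1 = t)]

theorem getD_tagcountA (l : List (String × Int)) (t : String) :
    (l.foldl (fun d p => d.insert p.1 (max (d.getD p.1 0) p.2)) PySem.Dict.empty).getD t 0 = Mx l t := by
  rw [getD_maxfoldA l PySem.Dict.empty t (fun s => by rw [PySem.Dict.getD_empty]),
    PySem.Dict.getD_empty]
  exact max_eq_right (Mx_nonneg l t)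

theorem getD_maxcB (l : List (String × Int)) (t : String) :
    (l.foldl (fun d p => if d.getD p.1 0 < p.2 then d.insert p.1 p.2 else d) PySem.Dict.empty).getD t 0 = Mx l t := by
  rw [getD_maxfoldB l PySem.Dict.empty t (fun s => by rw [PySem.Dict.getD_empty]),
    PySem.Dict.getD_empty]
  exact max_eq_right (Mx_nonneg l t)

-- A's reversed loop (as a foldr) produces the last-occurrence dedup of the max-count tags
theorem resA_gen (pat : List (String × Int)) :
    ∀ l : List (String × Int), (∀ p ∈ l, p ∈ pat) →
      l.foldr (fun p res => if Mx pat p.1 ≤ p.2 ∧ p.1 ∉ res then p.1 :: res else res) []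
        = ((l.filter (fun p => decide (p.2 = Mx pat p.1))).map Prod.fst).dedup := by
  intro l
  induction l with
  | nil => intro _; simp
  | cons p l ih =>
    intro h
    have hp : p ∈ pat := h p (List.mem_cons_self ..)
    have hl : ∀ q ∈ l, q ∈ pat := fun q hq => h q (List.mem_cons_of_mem _ hq)
    rw [List.foldr_cons, ih hl]
    by_cases hq : p.2 = Mx pat p.1
    · have hcond : Mx pat p.1 ≤ p.2 := le_of_eq hq.symm
      rw [List.filter_cons_of_pos (by simpa using hq), List.map_cons]
      by_cases hmem : p.1 ∈ ((l.filter (fun p => decide (p.2 = Mx pat p.1))).map Prod.fst)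
      · rw [if_neg (fun hc => hc.2 (List.mem_dedup.mpr hmem)), List.dedup_cons_of_mem hmem]
      · rw [if_pos ⟨hcond, fun hc => hmem (List.mem_dedup.mp hc)⟩,
          List.dedup_cons_of_notMem hmem]
    · have hcond : ¬ (Mx pat p.1 ≤ p.2 ∧
          p.1 ∉ ((l.filter (fun p => decide (p.2 = Mx pat p.1))).map Prod.fst).dedup) :=
        fun hc => hq (le_antisymm (le_Mx_of_mem hp) hc.1)
      rw [if_neg hcond, List.filter_cons_of_neg (by simpa using hq)]

-- the index B's pos-loop last wrote for tag t (default d when t never qualifies)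
def lastPos (t : String) : List (Int × (String × Int)) → Int → Int
  | [], d => d
  | q :: zs, d => lastPos t zs (if q.2.1 = t then q.1 else d)

theorem lastPos_cons (t : String) (q : Int × (String × Int)) (zs : List (Int × (String × Int))) (d : Int) :
    lastPos t (q :: zs) d = lastPos t zs (if q.2.1 = t then q.1 else d) := rfl

theorem getD_posfold (zs : List (Int × (String × Int))) :
    ∀ (d : PySem.Dict String Int) (t : String),
      (zs.foldl (fun d q => d.insert q.2.1 q.1) d).getD t 0 = lastPos t zs (d.getD t 0) := by
  induction zs with
  | nil => intro d t; rfl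
  | cons q zs ih =>
    intro d t
    rw [List.foldl_cons, ih, lastPos_cons, PySem.Dict.getD_insert]
    congr 1
    by_cases h : t = q.2.1
    · subst h
      simp
    · simp [h, (show ¬ q.2.1 = t from fun e => h e.symm)]

theorem lastPos_notMem {t : String} {zs : List (Int × (String × Int))}
    (h : t ∉ zs.map (fun q => q.2.1)) (d : Int) : lastPos t zs d = d := by
  induction zs generalizing d with
  | nil => rfl
  | cons q zs ih =>
    simp only [List.map_cons, List.mem_cons, not_or] at h
    rw [lastPos_cons, if_neg (fun e : q.2.1 = t => h.1 e.symm)]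
    exact ih h.2 d

theorem lastPos_congr_default {t : String} {zs : List (Int × (String × Int))}
    (h : t ∈ zs.map (fun q => q.2.1)) (d d' : Int) : lastPos t zs d = lastPos t zs d' := by
  induction zs generalizing d d' with
  | nil => cases h
  | cons q zs ih =>
    rw [lastPos_cons, lastPos_cons]
    by_cases hm : t ∈ zs.map (fun q => q.2.1)
    · exact ih hm _ _
    · have hqt : q.2.1 = t := by
        simp only [List.map_cons, List.mem_cons] at h
        tauto
      rw [if_pos hqt, if_pos hqt]

theorem lastPos_mem_fst {t : String} {zs : List (Int × (String × Int))}
    (h : t ∈ zs.map (fun q => q.2.1)) (d : Int) :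
    ∃ q ∈ zs, q.2.1 = t ∧ lastPos t zs d = q.1 := by
  induction zs generalizing d with
  | nil => cases h
  | cons q zs ih =>
    by_cases hm : t ∈ zs.map (fun q => q.2.1)
    · obtain ⟨r, hr, ht, he⟩ := ih (d := (if q.2.1 = t then q.1 else d)) hm
      exact ⟨r, List.mem_cons_of_mem _ hr, ht, by rw [lastPos_cons]; exact he⟩
    · have hqt : q.2.1 = t := by
        simp only [List.map_cons, List.mem_cons] at h
        tauto
      refine ⟨q, List.mem_cons_self .., hqt, ?_⟩
      rw [lastPos_cons, if_pos hqt]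
      exact lastPos_notMem hm q.1

theorem pairwise_lastPos (zs : List (Int × (String × Int)))
    (h : zs.Pairwise (fun a b => a.1 < b.1)) :
    ((zs.map (fun q => q.2.1)).dedup).Pairwise (fun a b => lastPos a zs 0 < lastPos b zs 0) := by
  induction zs with
  | nil => simp
  | cons w zs ih =>
    rw [List.pairwise_cons] at h
    obtain ⟨hw, htail⟩ := h
    have ihp := ih htail
    rw [List.map_cons]
    by_cases hmem : w.2.1 ∈ zs.map (fun q => q.2.1)
    · rw [List.dedup_cons_of_mem hmem]
      refine ihp.imp_of_mem ?_
      intro a b ha hb hab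
      have ha' : a ∈ zs.map (fun q => q.2.1) := List.mem_dedup.mp ha
      have hb' : b ∈ zs.map (fun q => q.2.1) := List.mem_dedup.mp hb
      rw [lastPos_cons, lastPos_cons, lastPos_congr_default ha' _ 0, lastPos_congr_default hb' _ 0]
      exact hab
    · rw [List.dedup_cons_of_notMem hmem]
      refine List.Pairwise.cons ?_ ?_
      · intro b hb
        have hb' : b ∈ zs.map (fun q => q.2.1) := List.mem_dedup.mp hb
        have h1 : lastPos w.2.1 (w :: zs) 0 = w.1 := by
          rw [lastPos_cons, if_pos rfl]
          exact lastPos_notMem hmem w.1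
        have h2 : lastPos b (w :: zs) 0 = lastPos b zs 0 := by
          rw [lastPos_cons]
          exact lastPos_congr_default hb' _ _
        obtain ⟨q, hq, _, he⟩ := lastPos_mem_fst hb' 0
        rw [h1, h2, he]
        exact hw q hq
      · refine ihp.imp_of_mem ?_
        intro a b ha hb hab
        have ha' : a ∈ zs.map (fun q => q.2.1) := List.mem_dedup.mp ha
        have hb' : b ∈ zs.map (fun q => q.2.1) := List.mem_dedup.mp hb
        rw [lastPos_cons, lastPos_cons, lastPos_congr_default ha' _ 0, lastPos_congr_default hb' _ 0]
        exact hab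

theorem map_snd_filter_enumerate (f : String × Int → Bool) :
    ∀ (l : List (String × Int)) (s : Int),
      (((PySem.List.enumerate l s).filter (fun q => f q.2)).map (fun q => q.2)) = l.filter f := by
  intro l
  induction l with
  | nil => intro s; rfl
  | cons p l ih =>
    intro s
    rw [PySem.List.enumerate_cons]
    by_cases h : f p
    · rw [List.filter_cons_of_pos (by simpa using h), List.map_cons, ih, List.filter_cons_of_pos h]
    · rw [List.filter_cons_of_neg (by simpa using h), ih, List.filter_cons_of_neg h]

-- ===== VERDICT (by name: the statement is the Claim_ definition above) =====
theorem ntag2pat_spec : Claim_equal_ntag2pat := by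
  intro ntag en_pat _ _
  show ntag2pat ntag en_pat = ntag2pat_alt ntag en_pat
  unfold ntag2pat ntag2pat_alt
  cases hw : PySem.List.pyGet? (PySem.Str.split₀ en_pat) (-1) with
  | none => rfl
  | some w =>
    by_cases hwh : whList.contains w
    · simp only [if_pos hwh]
    · simp only [if_neg hwh]
      set pat := pyRuns (ntag.filter (fun tag => decide (tag ≠ "_"))) with hpat
      -- A side
      have hAcond : (fun (res : List String) (p : String × Int) =>
            if (pat.foldl (fun d p => d.insert p.1 (max (d.getD p.1 0) p.2)) PySem.Dict.empty).getD p.1 0 ≤ p.2 ∧ p.1 ∉ res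
            then PySem.List.insert res 0 p.1 else res)
          = (fun res p => if Mx pat p.1 ≤ p.2 ∧ p.1 ∉ res then p.1 :: res else res) := by
        funext res p
        rw [getD_tagcountA, PySem.List.insert_zero]
      rw [hAcond, List.foldl_reverse, resA_gen pat pat (fun _ hp => hp)]
      -- B side
      have hBcond : (fun (d : PySem.Dict String Int) (q : Int × (String × Int)) =>
            if q.2.2 = (pat.foldl (fun d p => if d.getD p.1 0 < p.2 then d.insert p.1 p.2 else d) PySem.Dict.empty).getD q.2.1 0
            then d.insert q.2.1 q.1 else d)
          = (fun d q => if q.2.2 = Mx pat q.2.1 then d.insert q.2.1 q.1 else d) := by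
        funext d q
        rw [getD_maxcB]
      rw [hBcond]
      rw [PySem.List.foldl_ite_eq_foldl_filter
        (p := fun q : Int × (String × Int) => q.2.2 = Mx pat q.2.1)
        (f := fun (d : PySem.Dict String Int) (q : Int × (String × Int)) => d.insert q.2.1 q.1)]
      set zs := (PySem.List.enumerate pat 0).filter (fun q => decide (q.2.2 = Mx pat q.2.1)) with hzs
      set pos := zs.foldl (fun d q => d.insert q.2.1 q.1) PySem.Dict.empty with hpos
      have hzpw : zs.Pairwise (fun a b => a.1 < b.1) :=
        (PySem.List.pairwise_lt_enumerate (xs := pat) (s := 0)).filter _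
      have hkeymem : ∀ t, t ∈ pos.keys ↔ t ∈ zs.map (fun q => q.2.1) := by
        intro t
        rw [hpos, PySem.Dict.keys_foldl_insert_key, PySem.Dict.keys_empty]
        have : PySem.Set.update ([] : List String) (zs.map (fun q => q.2.1))
            = PySem.Set.ofList (zs.map (fun q => q.2.1)) := (PySem.Set.ofList_eq_foldl _).symm
        rw [this, PySem.Set.mem_ofList]
      have hkeynd : pos.keys.Nodup :=
        PySem.Dict.nodup_keys_foldl_insert_key zs (fun q => q.2.1) (fun d q => q.1)
          PySem.Dict.empty PySem.Dict.nodup_keys_empty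
      have htmem : ∀ t, t ∈ (zs.map (fun q => q.2.1)).dedup ↔ t ∈ pos.keys := by
        intro t
        rw [List.mem_dedup, hkeymem]
      have hperm : ((zs.map (fun q => q.2.1)).dedup).Perm pos.keys :=
        (List.perm_ext_iff_of_nodup (List.nodup_dedup _) hkeynd).mpr htmem
      have hgetD : ∀ t, pos.getD t 0 = lastPos t zs 0 := by
        intro t
        rw [hpos, getD_posfold, PySem.Dict.getD_empty]
      have hpw : ((zs.map (fun q => q.2.1)).dedup).Pairwise
          (fun a b => pos.getD a 0 < pos.getD b 0) := by
        refine (pairwise_lastPos zs hzpw).imp (fun {a b} hab => ?_)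
        rw [hgetD a, hgetD b]
        exact hab
      rw [PySem.List.sorted_eq_of_perm_of_pairwise_lt _ _ _ hperm hpw]
      -- identify the two dedup'd tag lists
      have hmaps : zs.map (fun q => q.2.1)
          = (pat.filter (fun p => decide (p.2 = Mx pat p.1))).map Prod.fst := by
        rw [show (fun q : Int × (String × Int) => q.2.1)
            = (fun p : String × Int => p.1) ∘ (fun q : Int × (String × Int) => q.2) from rfl,
          ← List.map_map, hzs]
        rw [map_snd_filter_enumerate (fun p => decide (p.2 = Mx pat p.1)) pat 0]
      rw [hmaps]
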